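-- pv_equiv track=rewrite | github.com/reliableengineer0308/alignerr-code-verifier-scale-up | monkey/inclusion-exclusion-principle/solution.py | inclusion_exclusion
-- ===== SOURCE A (Python) =====
-- def inclusion_exclusion(n, primes):
--     """
--     Count numbers from 1 to n divisible by at least one prime in the list
--     using inclusion-exclusion principle
--     """
--     k = len(primes)
--     total = 0
--
--     # Generate all non-empty subsets
--     for i in range(1, 1 << k):
--         product = 1
--         count = 0
--
--         for j in range(k):
--             if i & (1 << j):
--                 product *= primes[j]
--                 count += 1
--
--         if count % 2 == 1:
--             total += n // product
--         else:
--             total -= n // product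
--
--     return total
-- ===== SOURCE B (Python) =====
-- def inclusion_exclusion(n, primes):
--     """
--     Count numbers from 1 to n divisible by at least one prime in the list
--     using inclusion-exclusion principle.
--
--     Recursive include/exclude walk over the prime list instead of bitmask
--     subset enumeration: at each index the prime is either skipped or folded
--     into the running product, with the selection depth tracked for the sign.
--     """
--     def helper(idx, product, depth):
--         if idx == len(primes):
--             if depth == 0:
--                 return 0
--             return n // product if depth % 2 == 1 else -(n // product)
--         return helper(idx + 1, product, depth) + helper(idx + 1, product * primes[idx], depth + 1)
--
--     return helper(0, 1, 0)
-- ===== Notes on version B (the rewrite author's own statement) =====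
-- stated objective: alternative
-- what changed: Replaces bitmask enumeration of all 2^k subsets (each mask re-scanning all k bit positions to rebuild its product and popcount) by a direct include/exclude recursion over the prime list that threads the running product and selection depth, so each node of the recursion tree does O(1) work.
import Mathlib
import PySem

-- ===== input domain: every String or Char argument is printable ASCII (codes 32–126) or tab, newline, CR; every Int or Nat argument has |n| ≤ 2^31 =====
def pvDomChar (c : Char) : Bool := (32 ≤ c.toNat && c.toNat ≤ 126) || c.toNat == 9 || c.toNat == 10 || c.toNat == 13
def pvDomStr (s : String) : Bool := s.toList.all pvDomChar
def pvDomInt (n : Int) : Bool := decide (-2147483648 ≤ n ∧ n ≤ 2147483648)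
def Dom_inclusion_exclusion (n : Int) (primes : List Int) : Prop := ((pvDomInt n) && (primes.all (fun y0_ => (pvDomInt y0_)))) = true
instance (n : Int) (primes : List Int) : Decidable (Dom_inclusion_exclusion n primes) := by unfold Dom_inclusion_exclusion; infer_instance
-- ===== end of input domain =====

-- B replaces A's bitmask subset enumeration (inner loop rescanning all bit positions per mask)
-- by an include/exclude recursion over the prime list threading the running product and depth
-- (objective: alternative decomposition, same exact return value).

-- ===== PORT A =====
def inclusion_exclusion (n : Int) (primes : List Int) : Int :=
  let k := primes.length
  (PySem.List.pyRange 1 ((1 : Int) <<< k)).foldl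
    (fun total i =>
      let pc : Int × Int := (PySem.List.pyRange 0 (k : Int)).foldl
        (fun pc j =>
          -- j runs over 0..k-1, so j.toNat is exact and primes[j] is always in range
          if PySem.Int.band i ((1 : Int) <<< j.toNat) ≠ 0 then
            (pc.1 * PySem.List.pyGetD primes j 0, pc.2 + 1)
          else pc) (1, 0)
      if PySem.Int.mod pc.2 2 = 1 then total + PySem.Int.floordiv n pc.1
      else total - PySem.Int.floordiv n pc.1)
    0

-- ===== PORT B =====
-- helper(idx, product, depth) of Source B: recursion on the remaining suffix primes[idx:]
def ieHelper (n : Int) (rest : List Int) (product : Int) (depth : Int) : Int :=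
  match rest with
  | [] =>
    if depth = 0 then 0
    else if PySem.Int.mod depth 2 = 1 then PySem.Int.floordiv n product
    else -(PySem.Int.floordiv n product)
  | p :: rest' => ieHelper n rest' product depth + ieHelper n rest' (product * p) (depth + 1)

def inclusion_exclusion_alt (n : Int) (primes : List Int) : Int :=
  ieHelper n primes 1 0

-- ===== PRECONDITION & SPEC =====
-- Pre_ excludes exactly the inputs on which the Python A raises ZeroDivisionError:
-- when 0 is among the primes, some selected subset has product 0 and 'n // product' raises
-- (B raises there too).
def Pre_inclusion_exclusion (n : Int) (primes : List Int) : Prop := (0 : Int) ∉ primes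
instance (n : Int) (primes : List Int) : Decidable (Pre_inclusion_exclusion n primes) := by
  unfold Pre_inclusion_exclusion; infer_instance

def pvWitness_inclusion_exclusion : Int × List Int := (100, [2, 3, 5])

def Spec_inclusion_exclusion (n : Int) (primes : List Int) (out : Int) : Prop := out = inclusion_exclusion_alt n primes
instance (n : Int) (primes : List Int) (out : Int) : Decidable (Spec_inclusion_exclusion n primes out) := by unfold Spec_inclusion_exclusion; infer_instance

-- ===== CLAIM (what is proved, stated in full; the proofs are below) =====
def Claim_equal_inclusion_exclusion : Prop := ∀ (n : Int) (primes : List Int), Dom_inclusion_exclusion n primes → Pre_inclusion_exclusion n primes → Spec_inclusion_exclusion n primes (inclusion_exclusion n primes)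

-- ===== LEMMAS AND PROOFS =====

-- (product, count) of the subset of l selected by the low bits of the mask i
def pcnt : List Int → Nat → Int × Nat
  | [], _ => (1, 0)
  | p :: l, i =>
    if i % 2 = 1 then (p * (pcnt l (i / 2)).1, (pcnt l (i / 2)).2 + 1)
    else pcnt l (i / 2)

-- A's contribution of mask i
def aterm (n : Int) (l : List Int) (i : Nat) : Int :=
  if PySem.Int.mod ((pcnt l i).2 : Int) 2 = 1 then PySem.Int.floordiv n (pcnt l i).1
  else -(PySem.Int.floordiv n (pcnt l i).1)

-- B's leaf value for mask i, with accumulated product and depth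
def bterm (n : Int) (l : List Int) (prod d : Int) (i : Nat) : Int :=
  if d + ((pcnt l i).2 : Int) = 0 then 0
  else if PySem.Int.mod (d + ((pcnt l i).2 : Int)) 2 = 1 then PySem.Int.floordiv n (prod * (pcnt l i).1)
  else -(PySem.Int.floordiv n (prod * (pcnt l i).1))

lemma pcnt_zero (l : List Int) : pcnt l 0 = (1, 0) := by
  induction l with
  | nil => rfl
  | cons p l ih => simp [pcnt, ih]

lemma pcnt_snd_ne_zero (l : List Int) (i : Nat) (hi : i < 2 ^ l.length) (h0 : i ≠ 0) :
    (pcnt l i).2 ≠ 0 := by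
  induction l generalizing i with
  | nil => simp at hi; omega
  | cons p l ih =>
    by_cases h : i % 2 = 1
    · simp [pcnt, h]
    · have h2 : i / 2 ≠ 0 := by omega
      have hlt : i / 2 < 2 ^ l.length := by
        simp only [List.length_cons, pow_succ] at hi; omega
      simpa [pcnt, h] using ih (i / 2) hlt h2

lemma sum_range_double (m : Nat) (f : Nat → Int) :
    ((List.range (2 * m)).map f).sum
      = ((List.range m).map (fun i => f (2 * i) + f (2 * i + 1))).sum := by
  induction m with
  | zero => simp
  | succ m ih =>
    have h : 2 * (m + 1) = (2 * m) + 1 + 1 := by omega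
    rw [h, List.range_succ, List.range_succ, List.range_succ (n := m)]
    simp [ih]

lemma bterm_even (n p : Int) (l : List Int) (prod d : Int) (i : Nat) :
    bterm n (p :: l) prod d (2 * i) = bterm n l prod d i := by
  have h2 : (2 * i) / 2 = i := by omega
  simp [bterm, pcnt, h2]

lemma bterm_odd (n p : Int) (l : List Int) (prod d : Int) (i : Nat) :
    bterm n (p :: l) prod d (2 * i + 1) = bterm n l (prod * p) (d + 1) i := by
  have h1 : (2 * i + 1) % 2 = 1 := by omega
  have h2 : (2 * i + 1) / 2 = i := by omega
  have e : d + (((pcnt l i).2 + 1 : Nat) : Int) = (d + 1) + ((pcnt l i).2 : Int) := by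
    push_cast; ring
  simp only [bterm, pcnt, h1, h2, if_true]
  rw [e, ← mul_assoc]

lemma ieHelper_sum (l : List Int) (n prod d : Int) :
    ieHelper n l prod d = ((List.range (2 ^ l.length)).map (bterm n l prod d)).sum := by
  induction l generalizing prod d with
  | nil => simp [ieHelper, bterm, pcnt]
  | cons p l ih =>
    have hlen : 2 ^ (p :: l).length = 2 * 2 ^ l.length := by
      simp [List.length_cons, pow_succ]; ring
    rw [show ieHelper n (p :: l) prod d
          = ieHelper n l prod d + ieHelper n l (prod * p) (d + 1) from rfl,
        ih, ih, hlen, sum_range_double]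
    have hfun : (fun i => bterm n (p :: l) prod d (2 * i) + bterm n (p :: l) prod d (2 * i + 1))
        = fun i => bterm n l prod d i + bterm n l (prod * p) (d + 1) i := by
      funext i; rw [bterm_even, bterm_odd]
    rw [hfun, PySem.List.sum_map_add_int]

lemma foldl_pcnt (l : List Int) (i : Nat) (a c : Int) :
    (List.range l.length).foldl
      (fun (pc : Int × Int) j => if i.testBit j then (pc.1 * l.getD j 0, pc.2 + 1) else pc) (a, c)
      = (a * (pcnt l i).1, c + ((pcnt l i).2 : Int)) := by
  induction l generalizing i a c with
  | nil => simp [pcnt]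
  | cons p l ih =>
    rw [List.length_cons, List.range_succ_eq_map, List.foldl_cons, List.foldl_map]
    have hf : (fun (pc : Int × Int) (j : Nat) =>
          if i.testBit j.succ then (pc.1 * (p :: l).getD j.succ 0, pc.2 + 1) else pc)
        = fun (pc : Int × Int) (j : Nat) =>
          if (i / 2).testBit j then (pc.1 * l.getD j 0, pc.2 + 1) else pc := by
      funext pc j
      rw [Nat.succ_eq_add_one, Nat.testBit_add_one, List.getD_cons_succ]
    rw [hf]
    by_cases h : i % 2 = 1
    · have hb : i.testBit 0 = true := by simp [Nat.testBit_zero, h]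
      rw [hb]
      simp only [if_true, List.getD_cons_zero]
      rw [ih]
      have hp : pcnt (p :: l) i = (p * (pcnt l (i / 2)).1, (pcnt l (i / 2)).2 + 1) := by
        simp [pcnt, h]
      rw [hp]
      simp only [Prod.mk.injEq]
      constructor
      · ring
      · push_cast; ring
    · have hb : i.testBit 0 = false := by simp [Nat.testBit_zero, h]
      rw [hb]
      simp only [Bool.false_eq_true, if_false]
      rw [ih]
      have hp : pcnt (p :: l) i = pcnt l (i / 2) := by simp [pcnt, h]
      rw [hp]

lemma inner_eq (l : List Int) (i : Nat) :
    (PySem.List.pyRange 0 (l.length : Int)).foldl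
      (fun (pc : Int × Int) j =>
        if PySem.Int.band (i : Int) ((1 : Int) <<< j.toNat) ≠ 0 then
          (pc.1 * PySem.List.pyGetD l j 0, pc.2 + 1)
        else pc) (1, 0)
    = ((pcnt l i).1, ((pcnt l i).2 : Int)) := by
  rw [PySem.List.pyRange_zero_natCast, List.foldl_map]
  refine (List.foldl_ext _
      (fun (pc : Int × Int) (j : Nat) => if i.testBit j then (pc.1 * l.getD j 0, pc.2 + 1) else pc)
      _ ?_).trans ?_
  · intro x y _
    dsimp only
    rw [Int.toNat_natCast, Int.one_shiftLeft, PySem.Int.band_natCast,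
        PySem.List.pyGetD_natCast, Nat.and_two_pow]
    cases hb : i.testBit y <;> simp [hb]
  · rw [foldl_pcnt]
    simp

lemma pyRange_one_natCast (m : Nat) :
    PySem.List.pyRange 1 ((m + 1 : Nat) : Int)
      = (List.range m).map (fun j => ((j + 1 : Nat) : Int)) := by
  have h0 : (0 : Int) < ((m + 1 : Nat) : Int) := by exact_mod_cast Nat.succ_pos m
  have hz := PySem.List.pyRange_zero_natCast (m + 1)
  rw [List.range_succ_eq_map, List.map_cons, List.map_map, PySem.List.pyRange_one_cons h0] at hz
  simpa [Function.comp, Nat.succ_eq_add_one] using congrArg List.tail hz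

lemma A_char (n : Int) (l : List Int) :
    inclusion_exclusion n l
      = ((List.range (2 ^ l.length - 1)).map (fun j => aterm n l (j + 1))).sum := by
  obtain ⟨m', hm'⟩ : ∃ m', 2 ^ l.length = m' + 1 :=
    ⟨2 ^ l.length - 1, by have := Nat.two_pow_pos l.length; omega⟩
  have hshift : (1 : Int) <<< l.length = ((2 ^ l.length : Nat) : Int) := by
    rw [Int.shiftLeft_eq]; push_cast; ring
  unfold inclusion_exclusion
  dsimp only
  rw [hshift, hm', Nat.add_sub_cancel, pyRange_one_natCast]
  simp only [List.foldl_map]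
  refine (List.foldl_ext _
      (fun (total : Int) (j : Nat) => total + aterm n l (j + 1)) _ ?_).trans ?_
  · intro total y _
    dsimp only
    rw [inner_eq l (y + 1)]
    simp only [aterm, sub_eq_add_neg]
    split <;> rfl
  · rw [PySem.List.foldl_add, zero_add]

lemma alt_char (n : Int) (l : List Int) :
    inclusion_exclusion_alt n l
      = ((List.range (2 ^ l.length - 1)).map (fun j => aterm n l (j + 1))).sum := by
  obtain ⟨m', hm'⟩ : ∃ m', 2 ^ l.length = m' + 1 :=
    ⟨2 ^ l.length - 1, by have := Nat.two_pow_pos l.length; omega⟩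
  rw [show inclusion_exclusion_alt n l = ieHelper n l 1 0 from rfl, ieHelper_sum, hm',
      Nat.add_sub_cancel, List.range_succ_eq_map, List.map_cons, List.map_map, List.sum_cons]
  have h0 : bterm n l 1 0 0 = 0 := by simp [bterm, pcnt_zero]
  rw [h0, zero_add]
  refine congrArg List.sum (List.map_congr_left ?_)
  intro j hj
  have hjm : j + 1 < 2 ^ l.length := by
    rw [hm']; exact Nat.succ_lt_succ (List.mem_range.mp hj)
  have hc : (pcnt l (j + 1)).2 ≠ 0 := pcnt_snd_ne_zero l (j + 1) hjm (by omega)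
  simp [Function.comp, bterm, aterm, hc, Nat.succ_eq_add_one]

-- ===== VERDICT (by name: the statement is the Claim_ definition above) =====
theorem inclusion_exclusion_spec : Claim_equal_inclusion_exclusion := by
  intro n primes _ _
  unfold Spec_inclusion_exclusion
  rw [A_char, alt_char]
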